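-- pv_equiv track=rewrite | github.com/AdamZhouSE/pythonHomework | Code/CodeRecords/2613/60643/277631.py | connell
-- ===== SOURCE A (Python) =====
-- def connell(n):
--     if n==1:
--         return "1"
--     else:
--         even=[2*i for i in range(1,n)]
--         odd=[2*i-1 for i in range(1,n)]
--         res=[1]
--         i=2
--         while len(res)<n:
--             begin=0
--             if i%2==0:
--                 for item in even:
--                     if item > res[-1]:
--                         begin = even.index(item)
--                         break
--                 slice = even[begin:begin + i]
--                 res = res + slice
--                 even = even[i+begin:]
--                 i += 1
--             else:
--                 for item in odd:
--                     if item > res[-1]: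
--                         begin = odd.index(item)
--                         break
--                 slice = odd[begin:begin + i]
--                 res = res + slice
--                 odd = odd[i+begin:]
--                 i += 1
--         res=res[:n]
--         res=[str(x) for x in res]
--         return " ".join(res)
-- ===== SOURCE B (Python) =====
-- def connell(n):
--     # Single O(n) pass: generate the Connell sequence directly block by block
--     # (block m holds m consecutive numbers of step 2; between blocks the step is 1).
--     res = []
--     x = 1
--     block = 1
--     while len(res) < n:
--         for _ in range(block):
--             if len(res) == n:
--                 break
--             res.append(str(x))
--             x += 2
--         x -= 1
--         block += 1
--     return " ".join(res)
-- ===== Notes on version B (the rewrite author's own statement) =====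
-- stated objective: faster
-- what changed: B generates the Connell terms directly in one arithmetic pass (block counter, step-2 within a block, step-1 between blocks) instead of A's precomputed even/odd candidate lists with per-block linear scans, .index() rescans and repeated list slicing.
import Mathlib
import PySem

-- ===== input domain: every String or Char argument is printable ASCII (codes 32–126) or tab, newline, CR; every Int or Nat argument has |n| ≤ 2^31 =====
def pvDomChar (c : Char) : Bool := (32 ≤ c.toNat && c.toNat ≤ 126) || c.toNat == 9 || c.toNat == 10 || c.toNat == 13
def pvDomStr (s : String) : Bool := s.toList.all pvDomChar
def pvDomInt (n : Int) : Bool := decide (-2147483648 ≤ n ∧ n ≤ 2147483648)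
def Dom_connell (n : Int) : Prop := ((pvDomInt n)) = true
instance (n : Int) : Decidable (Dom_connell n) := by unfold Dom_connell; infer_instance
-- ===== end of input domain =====

-- B replaces A's even/odd candidate lists + per-block scans/index/slicing by direct
-- one-pass generation of the terms (objective: faster; measured on the timing inputs).

-- ===== PORT A =====
-- 'for item in lst: if item > last: begin = lst.index(item); break' (begin initialised 0)
def connellScanBegin (lst : List Int) (last : Int) : Int :=
  match lst.find? (fun item => decide (item > last)) with
  | some v => ((PySem.List.index? lst v).getD 0 : Nat)
  | none => 0

-- the 'while len(res)<n' loop; fuel bounds the iteration count (each iteration that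
-- continues appends at least one element, so n.toNat+1 iterations always suffice)
def connellLoop (fuel : Nat) (n : Int) (res even odd : List Int) (i : Int) : List Int :=
  match fuel with
  | 0 => res
  | f+1 =>
    if (res.length : Int) < n then
      -- res is never empty here (starts [1], only grows); res[-1]
      let last := (PySem.List.pyGet? res (-1)).getD 0
      if PySem.Int.mod i 2 == 0 then
        let b := connellScanBegin even last
        let sl := PySem.List.slice even (some b) (some (b + i))
        connellLoop f n (res ++ sl) (PySem.List.slice even (some (i + b)) none) odd (i + 1)
      else
        let b := connellScanBegin odd last
        let sl := PySem.List.slice odd (some b) (some (b + i))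
        connellLoop f n (res ++ sl) even (PySem.List.slice odd (some (i + b)) none) (i + 1)
    else res

def connell (n : Int) : String :=
  if n == 1 then "1"
  else
    let even := (PySem.List.pyRange 1 n 1).map (fun i => 2 * i)
    let odd := (PySem.List.pyRange 1 n 1).map (fun i => 2 * i - 1)
    let res := connellLoop (n.toNat + 1) n [1] even odd 2
    let res := PySem.List.slice res none (some n)
    PySem.Str.join " " (res.map (fun x => PySem.Int.toStr x))

-- ===== PORT B =====
-- 'for _ in range(block): if len(res)==n: break; res.append(str(x)); x += 2'
def connellAltInner (k : Nat) (n : Int) (res : List String) (x : Int) : List String × Int :=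
  match k with
  | 0 => (res, x)
  | k+1 =>
    if (res.length : Int) == n then (res, x)
    else connellAltInner k n (res ++ [PySem.Int.toStr x]) (x + 2)

-- 'while len(res) < n' loop of B (fuel as in connellLoop)
def connellAltLoop (fuel : Nat) (n : Int) (res : List String) (x block : Int) : List String :=
  match fuel with
  | 0 => res
  | f+1 =>
    if (res.length : Int) < n then
      let p := connellAltInner block.toNat n res x
      connellAltLoop f n p.1 (p.2 - 1) (block + 1)
    else res

def connell_alt (n : Int) : String :=
  PySem.Str.join " " (connellAltLoop (n.toNat + 1) n [] 1 1)

-- ===== PRECONDITION & SPEC =====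
def Spec_connell (n : Int) (out : String) : Prop := out = connell_alt n
instance (n : Int) (out : String) : Decidable (Spec_connell n out) := by unfold Spec_connell; infer_instance

-- ===== CLAIM (what is proved, stated in full; the proofs are below) =====
def Claim_equal_connell : Prop := ∀ (n : Int), Dom_connell n → Spec_connell n (connell n)

-- ===== LEMMAS AND PROOFS =====
-- ---------- canonical description of the sequence ----------
-- pvGen c d k = [2*d+c, 2*(d+1)+c, …] (k terms)
def pvGen (c : Int) (d k : Nat) : List Int := (List.range' d k).map (fun (j : Nat) => 2*(j:Int) + c)
def pvQ (m : Nat) : Nat := m*m/2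
def pvQ' (m : Nat) : Nat := (m*m+1)/2
def pvS (m : Nat) : Nat := m*(m+1)/2
def pvC (m : Nat) : Int := if m % 2 = 0 then 1 else 2
-- first m blocks of the Connell sequence (block m+1 starts at m^2+1, parity of m+1)
def pvConn : Nat → List Int
  | 0 => []
  | m+1 => pvConn m ++ pvGen (pvC m) (pvQ m) (m+1)

-- ---------- arithmetic ----------
theorem sq_mod_two (m : Nat) : m*m % 2 = m % 2 := by
  rcases Nat.mod_two_eq_zero_or_one m with h|h <;>
    · have := Nat.mul_mod m m 2; rw [h] at this; omega

theorem pvS_succ (m : Nat) : pvS (m+1) = pvS m + (m+1) := by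
  have hs := sq_mod_two m
  unfold pvS
  rw [show (m+1)*(m+1+1) = m*m + 3*m + 2 by ring, show m*(m+1) = m*m + m by ring]
  omega

theorem pvQ_succ_of_odd (m : Nat) (h : m % 2 = 1) : pvQ (m+1) = pvQ m + (m+1) := by
  have hs := sq_mod_two m
  unfold pvQ
  rw [show (m+1)*(m+1) = m*m + 2*m + 1 by ring]
  omega

theorem pvQ'_succ_of_even (m : Nat) (h : m % 2 = 0) : pvQ' (m+1) = pvQ m + (m+1) := by
  have hs := sq_mod_two m
  unfold pvQ pvQ'
  rw [show (m+1)*(m+1) = m*m + 2*m + 1 by ring]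
  omega

theorem pvQ_mono (m : Nat) : pvQ m ≤ pvQ (m+1) := by
  have h : m*m ≤ (m+1)*(m+1) := Nat.mul_le_mul (by omega) (by omega)
  unfold pvQ; omega

theorem pvQ'_mono (m : Nat) : pvQ' m ≤ pvQ' (m+1) := by
  have h : m*m ≤ (m+1)*(m+1) := Nat.mul_le_mul (by omega) (by omega)
  unfold pvQ'; omega

theorem pvQ_lt_pvS (m : Nat) (h : 1 ≤ m) : pvQ m + 1 ≤ pvS m := by
  have hs := sq_mod_two m
  unfold pvQ pvS
  rw [show m*(m+1) = m*m + m by ring]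
  omega

theorem le_pvS (m : Nat) : m ≤ pvS m := by
  rcases Nat.eq_zero_or_pos m with h|h
  · simp [h, pvS]
  · have h2 : m ≤ m*m := Nat.le_mul_of_pos_left m h
    unfold pvS; rw [show m*(m+1) = m*m + m by ring]; omega

theorem pvQC (m : Nat) : 2*((pvQ m : Nat):Int) + pvC m = (m:Int)*(m:Int) + 1 := by
  rcases Nat.mod_two_eq_zero_or_one m with h|h
  · have hn : 2*(pvQ m) + 1 = m*m + 1 := by have hs := sq_mod_two m; unfold pvQ; omega
    simp only [pvC, h, if_pos]
    calc 2*((pvQ m : Nat):Int) + 1 = ((2*(pvQ m) + 1 : Nat) : Int) := by push_cast; ring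
    _ = ((m*m+1 : Nat):Int) := by rw [hn]
    _ = (m:Int)*m + 1 := by push_cast; ring
  · have hn : 2*(pvQ m) + 2 = m*m + 1 := by have hs := sq_mod_two m; unfold pvQ; omega
    have : pvC m = 2 := by simp [pvC, h]
    rw [this]
    calc 2*((pvQ m : Nat):Int) + 2 = ((2*(pvQ m) + 2 : Nat) : Int) := by push_cast; ring
    _ = ((m*m+1 : Nat):Int) := by rw [hn]
    _ = (m:Int)*m + 1 := by push_cast; ring

-- jmin characterisations: first element of the relevant list exceeding m*m sits at index pvQ m
theorem pvGt_even (m : Nat) (h : m % 2 = 1) (j : Nat) :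
    (2*(j:Int) + 2 > (m:Int)*(m:Int)) ↔ pvQ m ≤ j := by
  have hs := sq_mod_two m
  rw [gt_iff_lt, show (m:Int)*(m:Int) = ((m*m : Nat):Int) by push_cast; ring,
     show 2*(j:Int) + 2 = ((2*j+2 : Nat):Int) by push_cast; ring, Int.ofNat_lt]
  unfold pvQ; omega

theorem pvGt_odd (m : Nat) (h : m % 2 = 0) (j : Nat) :
    (2*(j:Int) + 1 > (m:Int)*(m:Int)) ↔ pvQ m ≤ j := by
  have hs := sq_mod_two m
  rw [gt_iff_lt, show (m:Int)*(m:Int) = ((m*m : Nat):Int) by push_cast; ring,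
     show 2*(j:Int) + 1 = ((2*j+1 : Nat):Int) by push_cast; ring, Int.ofNat_lt]
  unfold pvQ; omega

-- ---------- pvGen structure ----------
theorem range'_take (d k t : Nat) (h : t ≤ k) : (List.range' d k).take t = List.range' d t := by
  induction k generalizing d t with
  | zero => simp [Nat.le_zero.mp h]
  | succ k ih =>
    cases t with
    | zero => simp
    | succ t => simp [List.range'_succ, ih (d+1) t (by omega)]

theorem pvGen_length (c : Int) (d k : Nat) : (pvGen c d k).length = k := by simp [pvGen]

theorem pvGen_take (c : Int) (d k t : Nat) (h : t ≤ k) : (pvGen c d k).take t = pvGen c d t := by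
  simp [pvGen, ← List.map_take, range'_take d k t h]

theorem pvGen_drop (c : Int) (d k t : Nat) : (pvGen c d k).drop t = pvGen c (d+t) (k-t) := by
  have hr : (List.range' d k).drop t = List.range' (d+t) (k-t) := by
    simpa using List.drop_range' (n := d) (m := k) (step := 1) (i := t)
  simp [pvGen, ← List.map_drop, hr]

theorem pvGen_find (c L : Int) (jmin : Nat)
    (h : ∀ j : Nat, (2*(j:Int) + c > L) ↔ jmin ≤ j) :
    ∀ (k d : Nat), d ≤ jmin → jmin < d + k →
    (pvGen c d k).find? (fun item => decide (item > L)) = some (2*(jmin:Int)+c) := by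
  intro k
  induction k with
  | zero => intro d h1 h2; omega
  | succ k ih =>
    intro d h1 h2
    rw [pvGen, List.range'_succ, List.map_cons, List.find?_cons]
    by_cases hj : jmin ≤ d
    · have hd : d = jmin := le_antisymm h1 hj
      subst hd
      have : (2*(d:Int) + c > L) := (h d).mpr le_rfl
      simp [this]
    · have : ¬ (2*(d:Int) + c > L) := fun hc => hj ((h d).mp hc)
      simp only [this, decide_false]
      exact ih (d+1) (by omega) (by omega)

theorem pvGen_index (c : Int) :
    ∀ (k d j : Nat), d ≤ j → j < d + k →
    PySem.List.index? (pvGen c d k) (2*(j:Int)+c) = some ((j - d : Nat)) := by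
  intro k
  induction k with
  | zero => intro d j h1 h2; omega
  | succ k ih =>
    intro d j h1 h2
    rw [pvGen, List.range'_succ, List.map_cons]
    by_cases hd : d = j
    · subst hd
      rw [PySem.List.index?_cons_self]
      simp
    · have hne : 2*(d:Int) + c ≠ 2*(j:Int) + c := by
        intro hc
        have : (d:Int) = (j:Int) := by linarith
        exact hd (by exact_mod_cast this)
      rw [PySem.List.index?_cons_of_ne _ hne]
      have := ih (d+1) j (by omega) (by omega)
      rw [pvGen] at this
      rw [this]
      simp
      omega

theorem scanBegin_pvGen (c L : Int) (jmin d k : Nat)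
    (h : ∀ j : Nat, (2*(j:Int) + c > L) ↔ jmin ≤ j)
    (hd : d ≤ jmin) (hk : jmin < d + k) :
    connellScanBegin (pvGen c d k) L = ((jmin - d : Nat) : Int) := by
  unfold connellScanBegin
  rw [pvGen_find c L jmin h k d hd hk]
  simp only []
  rw [pvGen_index c k d jmin hd hk]
  rfl

theorem pvGen_slice (c : Int) (d k b t : Nat) :
    PySem.List.slice (pvGen c d k) (some (b:Int)) (some ((b:Int) + (t:Int)))
      = pvGen c (d+b) (min t (k-b)) := by
  rw [PySem.List.slice_natCast_add, pvGen_drop]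
  rcases Nat.le_total t (k-b) with h|h
  · rw [pvGen_take _ _ _ _ h, Nat.min_eq_left h]
  · rw [List.take_of_length_le (by rw [pvGen_length]; omega), Nat.min_eq_right h]

theorem pvGen_slice_from (c : Int) (d k a : Nat) :
    PySem.List.slice (pvGen c d k) (some (a:Int)) none = pvGen c (d+a) (k-a) := by
  rw [PySem.List.slice_from_natCast, pvGen_drop]

theorem pvGen_eq_range (c : Int) (d t : Nat) :
    pvGen c d t = (List.range t).map (fun (u : Nat) => 2*(d:Int) + c + 2*(u:Int)) := by
  rw [pvGen, List.range'_eq_map_range, List.map_map]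
  exact List.map_congr_left (fun u _ => by simp only [Function.comp]; push_cast; ring)

-- ---------- pvConn structure ----------
theorem pvConn_length (m : Nat) : (pvConn m).length = pvS m := by
  induction m with
  | zero => simp [pvConn, pvS]
  | succ m ih => simp [pvConn, ih, pvGen_length, pvS_succ]

theorem pvConn_getLast (m : Nat) (h : 1 ≤ m) :
    (pvConn m).getLast? = some ((m:Int)*(m:Int)) := by
  obtain ⟨m, rfl⟩ : ∃ k, m = k + 1 := ⟨m - 1, by omega⟩
  rw [pvConn, List.getLast?_append]
  have hb : (pvGen (pvC m) (pvQ m) (m+1)).getLast? = some (2*((pvQ m + m : Nat):Int) + pvC m) := by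
    rw [pvGen, List.range'_concat, List.map_append]
    simp
  rw [hb]
  have hq := pvQC m
  simp only [Option.some_or]
  congr 1
  push_cast
  push_cast at hq
  linarith

theorem pvConn_prefix (a b : Nat) (h : a ≤ b) : (pvConn a) <+: (pvConn b) := by
  induction b with
  | zero => simp [Nat.le_zero.mp h]
  | succ b ih =>
    rcases Nat.lt_or_ge a (b+1) with h2|h2
    · exact (ih (by omega)).trans ⟨pvGen (pvC b) (pvQ b) (b+1), rfl⟩
    · have : a = b+1 := by omega
      subst this; exact List.prefix_refl _

theorem pvConn_take_eq (a b k : Nat) (hk : k ≤ pvS a) (h : a ≤ b) :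
    (pvConn a).take k = (pvConn b).take k := by
  obtain ⟨t, ht⟩ := pvConn_prefix a b h
  rw [← ht, List.take_append_of_le_length (by rw [pvConn_length]; omega)]
-- ---------- loop exit ----------
theorem loopA_exit (fuel : Nat) (n : Int) (res e o : List Int) (i : Int)
    (h : n ≤ (res.length : Int)) : connellLoop fuel n res e o i = res := by
  cases fuel
  · rfl
  · simp only [connellLoop]; rw [if_neg (by omega)]

theorem loopB_exit (fuel : Nat) (n : Int) (res : List String) (x b : Int)
    (h : n ≤ (res.length : Int)) : connellAltLoop fuel n res x b = res := by
  cases fuel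
  · rfl
  · simp only [connellAltLoop]; rw [if_neg (by omega)]
-- ---------- B: the inner for-loop ----------
theorem altInner_spec (n : Int) :
    ∀ (k : Nat) (res : List String) (x : Int), (res.length : Int) ≤ n →
    connellAltInner k n res x =
      (res ++ (List.range (min k (n - (res.length:Int)).toNat)).map
          (fun (u : Nat) => PySem.Int.toStr (x + 2*(u:Int))),
       x + 2*((min k (n - (res.length:Int)).toNat : Nat) : Int)) := by
  intro k
  induction k with
  | zero => intro res x h; simp [connellAltInner]
  | succ k ih =>
    intro res x h
    rw [connellAltInner]
    by_cases he : (res.length : Int) = n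
    · have h0 : (n - (res.length:Int)).toNat = 0 := by omega
      simp [he]
    · have hne : ((res.length:Int) == n) = false := by simp [he]
      simp only [hne, Bool.false_eq_true, if_false]
      rw [ih (res ++ [PySem.Int.toStr x]) (x+2) (by simp; omega)]
      have ht : min (k+1) (n - (res.length:Int)).toNat
          = min k (n - ((res ++ [PySem.Int.toStr x]).length:Int)).toNat + 1 := by
        simp; omega
      rw [ht]
      generalize min k (n - ((res ++ [PySem.Int.toStr x]).length:Int)).toNat = t'
      refine Prod.ext ?_ ?_
      · simp only []
        rw [List.range_succ_eq_map, List.map_cons, List.map_map,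
            List.append_assoc, List.singleton_append]
        have hmap : (List.range t').map (fun (u:Nat) => PySem.Int.toStr (x + 2 + 2*(u:Int)))
            = (List.range t').map ((fun (u:Nat) => PySem.Int.toStr (x + 2*(u:Int))) ∘ Nat.succ) := by
          refine List.map_congr_left ?_
          intro u _
          simp only [Function.comp_apply]
          congr 1
          push_cast
          ring
        rw [hmap]
        simp
      · simp only []
        push_cast
        ring
-- ---------- B: the outer while-loop ----------
theorem loopB_main (n : Int) :
    ∀ (fuel m : Nat), (pvS m : Int) < n → n ≤ (pvS m : Int) + (fuel:Int) →
    connellAltLoop fuel n ((pvConn m).map PySem.Int.toStr) ((m:Int)*(m:Int)+1) ((m:Int)+1)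
      = ((pvConn n.toNat).take n.toNat).map PySem.Int.toStr := by
  intro fuel
  induction fuel with
  | zero => intro m h1 h2; norm_num at h2; omega
  | succ f ih =>
    intro m h1 h2
    have hlen : (((pvConn m).map PySem.Int.toStr).length : Int) = (pvS m : Int) := by
      simp [pvConn_length]
    simp only [connellAltLoop]
    rw [if_pos (by rw [hlen]; exact h1)]
    have hb : ((m:Int)+1).toNat = m+1 := by omega
    rw [hb]
    rw [altInner_spec n (m+1) _ _ (by rw [hlen]; omega)]
    have hT : (n - (((pvConn m).map PySem.Int.toStr).length:Int)).toNat
        = (n - (pvS m:Int)).toNat := by rw [hlen]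
    rw [hT]
    set t := min (m+1) (n - (pvS m:Int)).toNat with hts
    have htm : t ≤ m+1 := by omega
    have hblk : (List.range t).map
          (fun (u:Nat) => PySem.Int.toStr ((m:Int)*(m:Int)+1 + 2*(u:Int)))
        = ((pvGen (pvC m) (pvQ m) (m+1)).take t).map PySem.Int.toStr := by
      rw [pvGen_take _ _ _ _ htm, pvGen_eq_range, List.map_map]
      refine (List.map_congr_left ?_).symm
      intro u _
      simp only [Function.comp_apply]
      congr 1
      have hq := pvQC m
      linarith
    have hres : (pvConn m).map PySem.Int.toStr
          ++ ((pvGen (pvC m) (pvQ m) (m+1)).take t).map PySem.Int.toStr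
        = ((pvConn (m+1)).take (pvS m + t)).map PySem.Int.toStr := by
      rw [← List.map_append]
      congr 1
      conv_rhs => rw [show pvConn (m+1) = pvConn m ++ pvGen (pvC m) (pvQ m) (m+1) from rfl]
      rw [show pvS m + t = (pvConn m).length + t by rw [pvConn_length]]
      simp [List.take_append]
    simp only [hblk, hres]
    by_cases hfull : (pvS m : Int) + ((m:Int)+1) ≤ n
    · have htval : t = m+1 := by rw [hts]; omega
      have hfold : (pvConn (m+1)).take (pvS m + t) = pvConn (m+1) := by
        apply List.take_of_length_le
        rw [pvConn_length, pvS_succ, htval]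
      rw [hfold]
      have hx : ((m:Int)*(m:Int)+1 + 2*(t:Int)) - 1
          = ((m+1:Nat):Int)*((m+1:Nat):Int)+1 := by rw [htval]; push_cast; ring
      have hbl : ((m:Int)+1)+1 = ((m+1:Nat):Int)+1 := by push_cast; ring
      rw [hx, hbl]
      by_cases hcont : (pvS (m+1) : Int) < n
      · exact ih (m+1) hcont (by have := pvS_succ m; push_cast [this]; push_cast at h2; omega)
      · rw [not_lt] at hcont
        rw [loopB_exit _ _ _ _ _ (by simp [pvConn_length]; exact_mod_cast hcont)]
        have hk1 : n.toNat ≤ pvS (m+1) := by omega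
        have hk2 : m+1 ≤ n.toNat := by have := le_pvS (m+1); omega
        rw [← pvConn_take_eq (m+1) n.toNat n.toNat hk1 hk2]
        rw [List.take_of_length_le (by rw [pvConn_length]; have := pvS_succ m; omega)]
    · have htval : (t:Int) = n - (pvS m:Int) := by rw [hts]; omega
      have hexit : n ≤ ((((pvConn (m+1)).take (pvS m + t)).map PySem.Int.toStr).length : Int) := by
        have := pvS_succ m
        simp [pvConn_length]
        omega
      rw [loopB_exit _ _ _ _ _ hexit]
      have h3 : pvS m + t = n.toNat := by omega
      rw [h3]
      congr 1
      refine pvConn_take_eq (m+1) n.toNat n.toNat ?_ ?_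
      · have := pvS_succ m; omega
      · have := le_pvS m; omega
-- ---------- A: the while-loop ----------
theorem loopA_main (n : Int) (N : Nat) (hN : (N:Int) = n - 1) :
    ∀ (fuel m eD oD kE kO : Nat),
      1 ≤ m → eD + kE = N → oD + kO = N →
      eD ≤ pvQ m → oD ≤ pvQ' m →
      (pvS m : Int) < n → n ≤ (pvS m : Int) + (fuel:Int) →
      (connellLoop fuel n (pvConn m) (pvGen 2 eD kE) (pvGen 1 oD kO) ((m:Int)+1)).take n.toNat
        = (pvConn n.toNat).take n.toNat := by
  intro fuel
  induction fuel with
  | zero => intro m eD oD kE kO _ _ _ _ _ h1 h2; norm_num at h2; omega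
  | succ f ih =>
    intro m eD oD kE kO hm hkE hkO heD hoD h1 h2
    have hNge : pvS m ≤ N := by omega
    have hQS := pvQ_lt_pvS m hm
    have hSs := pvS_succ m
    simp only [connellLoop]
    rw [if_pos (show ((pvConn m).length:Int) < n by rw [pvConn_length]; exact h1)]
    rw [PySem.List.pyGet?_neg_one, pvConn_getLast m hm]
    simp only [Option.getD_some]
    have hmod : PySem.Int.mod ((m:Int)+1) 2 = (((m+1) % 2 : Nat) : Int) := by
      rw [show ((m:Int)+1) = ((m+1:Nat):Int) by push_cast; ring]
      exact_mod_cast PySem.Int.mod_natCast (m+1) 2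
    rcases Nat.mod_two_eq_zero_or_one m with hm2|hm2
    · -- m even: block m+1 is odd, the odd list is consumed
      have hmods : PySem.Int.mod ((m:Int)+1) 2 = 1 := by
        rw [hmod, show (m+1) % 2 = 1 by omega]; norm_num
      rw [if_neg (by rw [hmods]; decide)]
      have hQ'm : pvQ' m = pvQ m := by
        have := sq_mod_two m; unfold pvQ pvQ'; omega
      have hgt := pvGt_odd m hm2
      have hd : oD ≤ pvQ m := by omega
      have hkk : pvQ m < oD + kO := by omega
      rw [scanBegin_pvGen 1 ((m:Int)*(m:Int)) (pvQ m) oD kO hgt hd hkk]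
      rw [show (((pvQ m - oD : Nat)):Int) + ((m:Int)+1)
            = (((pvQ m - oD):Nat):Int) + (((m+1:Nat)):Int) by push_cast; ring]
      rw [pvGen_slice 1 oD kO (pvQ m - oD) (m+1)]
      rw [show ((m:Int)+1) + (((pvQ m - oD : Nat)):Int)
            = ((((m+1) + (pvQ m - oD) : Nat)):Int) by push_cast; ring]
      rw [pvGen_slice_from 1 oD kO ((m+1) + (pvQ m - oD))]
      rw [show oD + (pvQ m - oD) = pvQ m by omega,
          show kO - (pvQ m - oD) = N - pvQ m by omega,
          show oD + ((m+1) + (pvQ m - oD)) = pvQ m + (m+1) by omega,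
          show kO - ((m+1) + (pvQ m - oD)) = N - (pvQ m + (m+1)) by omega]
      set t := min (m+1) (N - pvQ m) with hts
      have htm : t ≤ m+1 := by omega
      have hsl : pvGen 1 (pvQ m) t = (pvGen (pvC m) (pvQ m) (m+1)).take t := by
        rw [pvGen_take _ _ _ _ htm, show pvC m = 1 by simp [pvC, hm2]]
      rw [hsl]
      rw [show pvConn m ++ (pvGen (pvC m) (pvQ m) (m+1)).take t
            = (pvConn (m+1)).take (pvS m + t) by
        conv_rhs => rw [show pvConn (m+1) = pvConn m ++ pvGen (pvC m) (pvQ m) (m+1) from rfl]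
        rw [show pvS m + t = (pvConn m).length + t by rw [pvConn_length]]
        simp [List.take_append]]
      by_cases hfull : m + 1 ≤ N - pvQ m
      · have htval : t = m+1 := by rw [hts]; omega
        rw [show (pvConn (m+1)).take (pvS m + t) = pvConn (m+1) from
          List.take_of_length_le (by rw [pvConn_length]; omega)]
        rw [show ((m:Int)+1)+1 = (((m+1:Nat)):Int)+1 by push_cast; ring]
        by_cases hcont : (pvS (m+1) : Int) < n
        · exact ih (m+1) eD (pvQ m + (m+1)) kE (N - (pvQ m + (m+1)))
            (by omega) hkE (by omega)
            (le_trans heD (pvQ_mono m))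
            (by rw [pvQ'_succ_of_even m hm2])
            hcont (by push_cast at h2 ⊢; omega)
        · rw [not_lt] at hcont
          rw [loopA_exit f n _ _ _ _ (by rw [pvConn_length]; exact hcont)]
          exact pvConn_take_eq (m+1) n.toNat n.toNat (by omega)
            (by have := le_pvS m; omega)
      · have htval : t = N - pvQ m := by rw [hts]; omega
        rw [loopA_exit f n _ _ _ _ (by rw [List.length_take, pvConn_length]; omega)]
        rw [List.take_take]
        rw [show min n.toNat (pvS m + t) = n.toNat by omega]
        exact pvConn_take_eq (m+1) n.toNat n.toNat (by omega)
          (by have := le_pvS m; omega)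
    · -- m odd: block m+1 is even, the even list is consumed
      have hmods : PySem.Int.mod ((m:Int)+1) 2 = 0 := by
        rw [hmod, show (m+1) % 2 = 0 by omega]; norm_num
      rw [if_pos (by rw [hmods]; rfl)]
      have hgt := pvGt_even m hm2
      have hkk : pvQ m < eD + kE := by omega
      rw [scanBegin_pvGen 2 ((m:Int)*(m:Int)) (pvQ m) eD kE hgt heD hkk]
      rw [show (((pvQ m - eD : Nat)):Int) + ((m:Int)+1)
            = (((pvQ m - eD):Nat):Int) + (((m+1:Nat)):Int) by push_cast; ring]
      rw [pvGen_slice 2 eD kE (pvQ m - eD) (m+1)]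
      rw [show ((m:Int)+1) + (((pvQ m - eD : Nat)):Int)
            = ((((m+1) + (pvQ m - eD) : Nat)):Int) by push_cast; ring]
      rw [pvGen_slice_from 2 eD kE ((m+1) + (pvQ m - eD))]
      rw [show eD + (pvQ m - eD) = pvQ m by omega,
          show kE - (pvQ m - eD) = N - pvQ m by omega,
          show eD + ((m+1) + (pvQ m - eD)) = pvQ m + (m+1) by omega,
          show kE - ((m+1) + (pvQ m - eD)) = N - (pvQ m + (m+1)) by omega]
      set t := min (m+1) (N - pvQ m) with hts
      have htm : t ≤ m+1 := by omega
      have hsl : pvGen 2 (pvQ m) t = (pvGen (pvC m) (pvQ m) (m+1)).take t := by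
        rw [pvGen_take _ _ _ _ htm, show pvC m = 2 by simp [pvC, hm2]]
      rw [hsl]
      rw [show pvConn m ++ (pvGen (pvC m) (pvQ m) (m+1)).take t
            = (pvConn (m+1)).take (pvS m + t) by
        conv_rhs => rw [show pvConn (m+1) = pvConn m ++ pvGen (pvC m) (pvQ m) (m+1) from rfl]
        rw [show pvS m + t = (pvConn m).length + t by rw [pvConn_length]]
        simp [List.take_append]]
      by_cases hfull : m + 1 ≤ N - pvQ m
      · have htval : t = m+1 := by rw [hts]; omega
        rw [show (pvConn (m+1)).take (pvS m + t) = pvConn (m+1) from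
          List.take_of_length_le (by rw [pvConn_length]; omega)]
        rw [show ((m:Int)+1)+1 = (((m+1:Nat)):Int)+1 by push_cast; ring]
        by_cases hcont : (pvS (m+1) : Int) < n
        · exact ih (m+1) (pvQ m + (m+1)) oD (N - (pvQ m + (m+1))) kO
            (by omega) (by omega) hkO
            (by rw [pvQ_succ_of_odd m hm2])
            (le_trans hoD (pvQ'_mono m))
            hcont (by push_cast at h2 ⊢; omega)
        · rw [not_lt] at hcont
          rw [loopA_exit f n _ _ _ _ (by rw [pvConn_length]; exact hcont)]
          exact pvConn_take_eq (m+1) n.toNat n.toNat (by omega)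
            (by have := le_pvS m; omega)
      · have htval : t = N - pvQ m := by rw [hts]; omega
        rw [loopA_exit f n _ _ _ _ (by rw [List.length_take, pvConn_length]; omega)]
        rw [List.take_take]
        rw [show min n.toNat (pvS m + t) = n.toNat by omega]
        exact pvConn_take_eq (m+1) n.toNat n.toNat (by omega)
          (by have := le_pvS m; omega)
-- ---------- assembling both programs ----------
theorem connell_alt_eq (n : Int) (h1 : 1 ≤ n) :
    connell_alt n = PySem.Str.join " "
      (((pvConn n.toNat).take n.toNat).map PySem.Int.toStr) := by
  unfold connell_alt
  congr 1
  have h0 : ([] : List String) = (pvConn 0).map PySem.Int.toStr := rfl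
  have hx : (1:Int) = ((0:Nat):Int)*((0:Nat):Int)+1 := by norm_num
  have hb : (1:Int) = ((0:Nat):Int)+1 := by norm_num
  rw [h0]
  conv_lhs => rw [hx, hb]
  exact loopB_main n (n.toNat+1) 0 (by simp [pvS]; omega) (by simp [pvS]; push_cast; omega)

theorem connell_eq (n : Int) (h2 : 2 ≤ n) :
    connell n = PySem.Str.join " "
      (((pvConn n.toNat).take n.toNat).map PySem.Int.toStr) := by
  have hne : (n == 1) = false := by simp; omega
  unfold connell
  rw [hne]
  simp only [Bool.false_eq_true, if_false]
  have hN : (((n-1).toNat : Nat):Int) = n - 1 := by omega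
  have heven : (PySem.List.pyRange 1 n 1).map (fun i => 2 * i) = pvGen 2 0 (n-1).toNat := by
    rw [PySem.List.pyRange_one, List.map_map, pvGen, ← List.range_eq_range']
    refine List.map_congr_left ?_
    intro u _
    simp only [Function.comp_apply]
    push_cast
    ring
  have hodd : (PySem.List.pyRange 1 n 1).map (fun i => 2 * i - 1) = pvGen 1 0 (n-1).toNat := by
    rw [PySem.List.pyRange_one, List.map_map, pvGen, ← List.range_eq_range']
    refine List.map_congr_left ?_
    intro u _
    simp only [Function.comp_apply]
    push_cast
    ring
  rw [heven, hodd]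
  have hres : [(1:Int)] = pvConn 1 := by decide
  rw [hres]
  rw [PySem.List.slice_to _ (by omega : (0:Int) ≤ n)]
  congr 1
  have hloop := loopA_main n (n-1).toNat hN (n.toNat+1) 1 0 0 (n-1).toNat (n-1).toNat
    le_rfl (by omega) (by omega) (by decide) (by decide)
    (by simp [pvS]; omega) (by simp [pvS]; push_cast; omega)
  rw [show ((1:Nat):Int)+1 = 2 by norm_num] at hloop
  rw [hloop]

-- ===== VERDICT (by name: the statement is the Claim_ definition above) =====
theorem connell_spec : Claim_equal_connell := by
  unfold Claim_equal_connell
  intro n _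
  unfold Spec_connell
  by_cases h1 : n = 1
  · subst h1; decide
  by_cases h0 : n ≤ 0
  · -- both programs return ""
    have hne : (n == 1) = false := by simp; omega
    have ht0 : n.toNat = 0 := by omega
    unfold connell connell_alt
    rw [hne]
    simp only [Bool.false_eq_true, if_false, ht0]
    rw [show connellLoop (0+1) n [1] ((PySem.List.pyRange 1 n 1).map (fun i => 2 * i))
          ((PySem.List.pyRange 1 n 1).map (fun i => 2 * i - 1)) 2 = [1] by
      simp only [connellLoop]
      rw [if_neg (by simp; omega)]]
    rw [show connellAltLoop (0+1) n [] 1 1 = [] by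
      simp only [connellAltLoop]
      rw [if_neg (by simp; omega)]]
    rw [show PySem.List.slice [(1:Int)] none (some n) = [] by
      rcases Nat.lt_or_ge 0 (-n).toNat with hk|hk
      · rw [show n = -(((-n).toNat : Nat):Int) by omega]
        rw [PySem.List.slice_to_neg_natCast _ _ hk]
        simp
        omega
      · have hn0 : n = 0 := by omega
        rw [hn0, PySem.List.slice_to _ (by norm_num)]
        simp]
    rfl
  · have h2 : 2 ≤ n := by omega
    rw [connell_eq n h2, connell_alt_eq n (by omega)]
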